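-- pv_equiv track=rewrite | github.com/981377660LMT/algorithm-study | leetcode/3557. 不相交子字符串的最大数量-划分型dp.py | maxSubstrings
-- ===== SOURCE A (Python) =====
-- def maxSubstrings(word: str) -> int:
--     res = 0
--     firstPos = dict()
--     for i, c in enumerate(word):
--         if c not in firstPos:
--             firstPos[c] = i
--         elif i - firstPos[c] >= 3:
--             res += 1
--             firstPos.clear()  # 找下一个子串
--     return res
-- ===== SOURCE B (Python) =====
-- def maxSubstrings(word: str) -> int:
--     # Partition DP: dp[i] = max number of disjoint valid substrings in word[:i].
--     # avail[c] = largest index l <= r-3 with word[l] == c (the best left endpoint: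
--     # dp is monotone, so the largest valid l maximises dp[l] + 1).
--     n = len(word)
--     dp = [0] * (n + 1)
--     avail = {}
--     for r in range(n):
--         if r >= 3:
--             avail[word[r - 3]] = r - 3
--         dp[r + 1] = dp[r]
--         l = avail.get(word[r])
--         if l is not None:
--             dp[r + 1] = max(dp[r + 1], dp[l] + 1)
--     return dp[n]
-- ===== Notes on version B (the rewrite author's own statement) =====
-- stated objective: alternative
-- what changed: Replaces A's greedy segment-cutting (first-occurrence dict cleared after each hit) by a partition DP: dp[r+1] = max(dp[r], dp[l]+1) for the largest l <= r-3 with word[l] == word[r], maintained via a latest-valid-position dict; returns dp[n].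
import Mathlib
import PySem

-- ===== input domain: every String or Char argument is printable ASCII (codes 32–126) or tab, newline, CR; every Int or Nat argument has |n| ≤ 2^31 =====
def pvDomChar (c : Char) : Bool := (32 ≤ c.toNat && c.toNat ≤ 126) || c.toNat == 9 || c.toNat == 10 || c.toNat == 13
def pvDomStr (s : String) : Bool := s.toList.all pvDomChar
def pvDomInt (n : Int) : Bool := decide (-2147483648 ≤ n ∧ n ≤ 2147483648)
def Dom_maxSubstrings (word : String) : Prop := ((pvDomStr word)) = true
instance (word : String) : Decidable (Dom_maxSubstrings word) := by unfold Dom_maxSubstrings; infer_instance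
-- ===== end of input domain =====

-- B replaces A's greedy segment-cutting (first-occurrence dict, cleared after each hit) by a
-- partition DP dp[r+1] = max(dp[r], dp[l]+1) over the largest l ≤ r-3 with word[l] = word[r]
-- (objective: alternative algorithm; not claimed faster).

-- ===== PORT A =====
-- loop body of A: dict lookup, insert on first sight, count + clear on a gap ≥ 3
def pvStepA (st : Int × PySem.Dict Char Int) (p : Int × Char) : Int × PySem.Dict Char Int :=
  match st.2.get? p.2 with
  | none => (st.1, st.2.insert p.2 p.1)
  | some j => if 3 ≤ p.1 - j then (st.1 + 1, PySem.Dict.empty) else st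

def maxSubstrings (word : String) : Int :=
  ((PySem.List.enumerate word.toList 0).foldl pvStepA (0, PySem.Dict.empty)).1

-- ===== PORT B =====
-- Source B's 'for r in range(n)' as Nat recursion on r; the state is (dp, avail); dp grows by one
-- cell per step (Python writes dp[r+1]).  Every Python list indexing here (word[r], word[r-3],
-- dp[r], dp[l]) is on a provably in-range nonnegative index, so getD is exact.
def pvLoopB (w : List Char) : Nat → List Int × PySem.Dict Char Nat
  | 0 => ([0], PySem.Dict.empty)
  | r + 1 =>
    let st := pvLoopB w r
    let av := if 3 ≤ r then st.2.insert (w.getD (r - 3) ' ') (r - 3) else st.2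
    let base := st.1.getD r 0
    let v := match av.get? (w.getD r ' ') with
      | none => base
      | some l => max base (st.1.getD l 0 + 1)
    (st.1 ++ [v], av)

def maxSubstrings_alt (word : String) : Int :=
  (pvLoopB word.toList word.toList.length).1.getD word.toList.length 0

-- ===== PRECONDITION & SPEC =====
def Spec_maxSubstrings (word : String) (out : Int) : Prop := out = maxSubstrings_alt word
instance (word : String) (out : Int) : Decidable (Spec_maxSubstrings word out) := by unfold Spec_maxSubstrings; infer_instance

-- ===== CLAIM (what is proved, stated in full; the proofs are below) =====
def Claim_equal_maxSubstrings : Prop := ∀ (word : String), Dom_maxSubstrings word → Spec_maxSubstrings word (maxSubstrings word)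

-- ===== LEMMAS AND PROOFS =====

-- proof-side greedy state machine on prefixes: (count, current segment start) after i chars;
-- a "hit" at i is: word[i] occurs in word[s : i-2], i.e. at some l with s ≤ l ≤ i-3
def gre (w : List Char) : Nat → Int × Nat
  | 0 => (0, 0)
  | i + 1 =>
    let p := gre w i
    if w.getD i ' ' ∈ (w.take (i - 2)).drop p.2 then (p.1 + 1, i + 1) else p

lemma gre_start_le (w : List Char) : ∀ m, (gre w m).2 ≤ m := by
  intro m
  induction m with
  | zero => exact le_refl _
  | succ m ih =>
    simp only [gre]
    split
    · simp
    · exact le_trans ih (by omega)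

lemma gre_mono (w : List Char) {i j : Nat} (h : i ≤ j) : (gre w i).1 ≤ (gre w j).1 := by
  induction j with
  | zero =>
    have : i = 0 := by omega
    subst this; exact le_refl _
  | succ j ih =>
    rcases Nat.lt_or_ge i (j + 1) with hlt | hge
    · have hij : i ≤ j := by omega
      have := ih hij
      simp only [gre]
      split
      · simp; omega
      · omega
    · have : i = j + 1 := by omega
      subst this; rfl

lemma gre_const (w : List Char) : ∀ r j, (gre w r).2 ≤ j → j ≤ r → (gre w j).1 = (gre w r).1 := by
  intro r
  induction r with
  | zero =>
    intro j _ h2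
    have : j = 0 := by omega
    subst this; rfl
  | succ r ih =>
    intro j h1 h2
    rcases Nat.lt_or_ge j (r + 1) with hlt | hge
    · have hj : j ≤ r := by omega
      simp only [gre] at h1 ⊢
      split at h1 <;> rename_i hcond
      · simp at h1
        exact absurd h1 (by omega)
      · rw [if_neg hcond]
        exact ih j h1 hj
    · have : j = r + 1 := by omega
      subst this; rfl

lemma gre_cut (w : List Char) : ∀ r, 1 ≤ (gre w r).2 →
    (gre w r).1 = (gre w ((gre w r).2 - 1)).1 + 1 := by
  intro r
  induction r with
  | zero => intro h; exact absurd h (Nat.not_succ_le_zero 0)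
  | succ r ih =>
    intro h
    simp only [gre] at h ⊢
    split at h
    · rename_i hcond
      simp only [if_pos hcond]
      simp
    · rename_i hcond
      simp only [if_neg hcond]
      exact ih h

-- first-occurrence index of c in a list (characterises A's dict entries within a segment)
def fIdx (c : Char) : List Char → Option Nat
  | [] => none
  | a :: t => if a = c then some 0 else (fIdx c t).map (· + 1)

lemma fIdx_lt_length {c : Char} {l : List Char} {k : Nat} (h : fIdx c l = some k) :
    k < l.length := by
  induction l generalizing k with
  | nil => simp [fIdx] at h
  | cons a t ih =>
    simp only [fIdx] at h
    split at h
    · simp_all; omega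
    · cases ht : fIdx c t with
      | none => simp [ht] at h
      | some k' =>
        simp [ht] at h
        have := ih ht
        simp
        omega

lemma fIdx_take_iff {c : Char} {l : List Char} {k : Nat} (h : fIdx c l = some k) (j : Nat) :
    c ∈ l.take j ↔ k < j := by
  induction l generalizing k j with
  | nil => simp [fIdx] at h
  | cons a t ih =>
    simp only [fIdx] at h
    split at h
    · rename_i hac
      cases h
      cases j with
      | zero => simp
      | succ j => simp [hac]
    · rename_i hac
      cases ht : fIdx c t with
      | none => simp [ht] at h
      | some k' =>
        simp [ht] at h
        cases j with
        | zero => simp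
        | succ j =>
          simp [List.take_succ_cons, Ne.symm hac, ih ht j]
          omega

lemma fIdx_mem {c : Char} {l : List Char} {k : Nat} (h : fIdx c l = some k) : c ∈ l := by
  have h1 := fIdx_take_iff h l.length
  have h2 := fIdx_lt_length h
  simpa [h2] using h1

lemma fIdx_append_ne {a c : Char} (h : a ≠ c) (l : List Char) :
    fIdx c (l ++ [a]) = fIdx c l := by
  induction l with
  | nil => simp [fIdx, h]
  | cons b t ih => simp [fIdx, ih]

lemma fIdx_append_self {c : Char} {l : List Char} (h : c ∉ l) :
    fIdx c (l ++ [c]) = some l.length := by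
  induction l with
  | nil => simp [fIdx]
  | cons b t ih =>
    simp at h
    simp [fIdx, Ne.symm h.1, ih h.2]

lemma fIdx_append_of_mem {c : Char} {l : List Char} (h : c ∈ l) (l' : List Char) :
    fIdx c (l ++ l') = fIdx c l := by
  induction l with
  | nil => simp at h
  | cons b t ih =>
    by_cases hb : b = c
    · simp [fIdx, hb]
    · simp at h
      rcases h with h | h
      · exact absurd h.symm hb
      · simp [fIdx, hb, ih h]

lemma fIdx_none_not_mem {c : Char} {l : List Char} (h : fIdx c l = none) : c ∉ l := by
  induction l with
  | nil => simp
  | cons a t ih =>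
    simp only [fIdx] at h
    split at h
    · simp at h
    · rename_i hac
      cases ht : fIdx c t with
      | none => simp [Ne.symm hac, ih ht]
      | some k => simp [ht] at h

-- last-occurrence index of c in a list (characterises B's avail entries)
def lIdx (c : Char) : List Char → Option Nat
  | [] => none
  | a :: t =>
    match lIdx c t with
    | some k => some (k + 1)
    | none => if a = c then some 0 else none

lemma lIdx_append (c a : Char) (l : List Char) :
    lIdx c (l ++ [a]) = if a = c then some l.length else lIdx c l := by
  induction l with
  | nil => by_cases h : a = c <;> simp [lIdx, h]
  | cons b t ih =>
    by_cases h : a = c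
    · simp only [List.cons_append, lIdx, ih, if_pos h, List.length_cons]
    · simp only [List.cons_append, lIdx, ih, if_neg h]

lemma lIdx_spec {c : Char} {l : List Char} {k : Nat} (h : lIdx c l = some k) :
    k < l.length ∧ l.getD k ' ' = c := by
  induction l generalizing k with
  | nil => simp [lIdx] at h
  | cons a t ih =>
    simp only [lIdx] at h
    cases ht : lIdx c t with
    | some k' =>
      rw [ht] at h
      simp only [Option.some.injEq] at h
      subst h
      obtain ⟨h1, h2⟩ := ih ht
      refine ⟨by simp; omega, ?_⟩
      simpa using h2
    | none =>
      rw [ht] at h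
      by_cases hac : a = c
      · rw [if_pos hac] at h
        simp only [Option.some.injEq] at h
        subst h
        exact ⟨by simp, by simpa using hac⟩
      · rw [if_neg hac] at h
        simp at h

lemma lIdx_none_not_mem {c : Char} {l : List Char} (h : lIdx c l = none) : c ∉ l := by
  induction l with
  | nil => simp
  | cons a t ih =>
    simp only [lIdx] at h
    cases ht : lIdx c t with
    | some k => rw [ht] at h; simp at h
    | none =>
      rw [ht] at h
      by_cases hac : a = c
      · rw [if_pos hac] at h; simp at h
      · simp [Ne.symm hac, ih ht]

lemma lIdx_max {c : Char} {l : List Char} {k : Nat} (h : lIdx c l = some k) :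
    ∀ j, j < l.length → l.getD j ' ' = c → j ≤ k := by
  induction l generalizing k with
  | nil => simp
  | cons a t ih =>
    intro j hj hc
    simp only [lIdx] at h
    cases ht : lIdx c t with
    | some k' =>
      rw [ht] at h
      simp only [Option.some.injEq] at h
      subst h
      cases j with
      | zero => omega
      | succ j =>
        have := ih ht j (by simpa using hj) (by simpa using hc)
        omega
    | none =>
      rw [ht] at h
      by_cases hac : a = c
      · rw [if_pos hac] at h
        simp only [Option.some.injEq] at h
        subst h
        cases j with
        | zero => omega
        | succ j =>
          exfalso
          apply lIdx_none_not_mem ht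
          have hjt : j < t.length := by simpa using hj
          have hgc : t.getD j ' ' = c := by simpa using hc
          rw [List.getD_eq_getElem t ' ' hjt] at hgc
          exact hgc ▸ List.getElem_mem hjt
      · rw [if_neg hac] at h
        simp at h

-- ===== A = greedy =====

lemma foldA (w : List Char) : ∀ (N m : Nat) (st : Int × PySem.Dict Char Int),
    w.length - m ≤ N → m ≤ w.length →
    st.1 = (gre w m).1 →
    (∀ c, st.2.get? c =
      (fIdx c ((w.drop (gre w m).2).take (m - (gre w m).2))).map
        (fun k => (((gre w m).2 + k : Nat) : Int))) →
    ((PySem.List.enumerate (w.drop m) (m : Int)).foldl pvStepA st).1 = (gre w w.length).1 := by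
  intro N
  induction N with
  | zero =>
    intro m st hN hm h1 h2
    have : m = w.length := by omega
    subst this
    simp [PySem.List.enumerate_nil, h1]
  | succ N ih =>
    intro m st hN hm h1 h2
    rcases Nat.lt_or_ge m w.length with hlt | hge
    · have hs_le : (gre w m).2 ≤ m := gre_start_le w m
      have hgetD : w.getD m ' ' = w[m] := List.getD_eq_getElem w ' ' hlt
      have hgre : gre w (m + 1) =
          if w[m] ∈ (w.take (m - 2)).drop (gre w m).2 then ((gre w m).1 + 1, m + 1)
          else gre w m := by
        simp only [gre, hgetD]
      have hseglen : ((w.drop (gre w m).2).take (m - (gre w m).2)).length = m - (gre w m).2 := by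
        simp
        omega
      have hslice : (w.take (m - 2)).drop (gre w m).2
          = ((w.drop (gre w m).2).take (m - (gre w m).2)).take (m - 2 - (gre w m).2) := by
        rw [List.drop_take, List.take_take]
        congr 1
        omega
      have hseg' : (w.drop (gre w m).2).take (m + 1 - (gre w m).2)
          = (w.drop (gre w m).2).take (m - (gre w m).2) ++ [w[m]] := by
        have : m + 1 - (gre w m).2 = (m - (gre w m).2) + 1 := by omega
        rw [this, List.take_add_one]
        congr 1
        have : (w.drop (gre w m).2)[m - (gre w m).2]? = w[m]? := by
          rw [List.getElem?_drop]
          congr 1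
          omega
        rw [this, List.getElem?_eq_getElem hlt]
        rfl
      have hdrop : w.drop m = w[m] :: w.drop (m + 1) := List.drop_eq_getElem_cons hlt
      have hcast : (m : Int) + 1 = ((m + 1 : Nat) : Int) := by push_cast; ring
      rw [hdrop, PySem.List.enumerate_cons, List.foldl_cons, hcast]
      cases hf : fIdx w[m] ((w.drop (gre w m).2).take (m - (gre w m).2)) with
      | none =>
        have hnm : w[m] ∉ (w.drop (gre w m).2).take (m - (gre w m).2) := fIdx_none_not_mem hf
        have hnohit : w[m] ∉ (w.take (m - 2)).drop (gre w m).2 := by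
          rw [hslice]
          intro hmem
          exact hnm (List.take_subset _ _ hmem)
        have hgre' : gre w (m + 1) = gre w m := by rw [hgre, if_neg hnohit]
        have hget : st.2.get? w[m] = none := by rw [h2, hf]; rfl
        have hstep : pvStepA st ((m : Int), w[m]) = (st.1, st.2.insert w[m] (m : Int)) := by
          simp [pvStepA, hget]
        rw [hstep]
        apply ih (m + 1) _ (by omega) (by omega)
        · rw [hgre']; exact h1
        · intro c'
          rw [hgre', hseg']
          by_cases hcc : c' = w[m]
          · subst hcc
            rw [PySem.Dict.get?_insert_self, fIdx_append_self hnm, hseglen]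
            simp
            omega
          · rw [PySem.Dict.get?_insert, if_neg hcc, h2 c',
              fIdx_append_ne (fun h => hcc h.symm)]
      | some k =>
        have hk : k < m - (gre w m).2 := by
          have := fIdx_lt_length hf
          omega
        have hget : st.2.get? w[m] = some (((gre w m).2 + k : Nat) : Int) := by
          rw [h2, hf]; rfl
        have hiff := fIdx_take_iff hf (m - 2 - (gre w m).2)
        by_cases hc3 : (gre w m).2 + k + 3 ≤ m
        · have hcond : (3 : Int) ≤ (m : Int) - (((gre w m).2 + k : Nat) : Int) := by
            push_cast; omega
          have hstep : pvStepA st ((m : Int), w[m]) = (st.1 + 1, PySem.Dict.empty) := by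
            simp only [pvStepA, hget]
            rw [if_pos hcond]
          have hhit : w[m] ∈ (w.take (m - 2)).drop (gre w m).2 := by
            rw [hslice]
            exact hiff.mpr (by omega)
          have hgre' : gre w (m + 1) = ((gre w m).1 + 1, m + 1) := by
            rw [hgre, if_pos hhit]
          rw [hstep]
          apply ih (m + 1) _ (by omega) (by omega)
          · rw [hgre', h1]
          · intro c'
            rw [hgre']
            simp [PySem.Dict.get?_empty, fIdx]
        · have hcond : ¬ (3 : Int) ≤ (m : Int) - (((gre w m).2 + k : Nat) : Int) := by
            push_cast; omega
          have hstep : pvStepA st ((m : Int), w[m]) = st := by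
            simp only [pvStepA, hget]
            rw [if_neg hcond]
          have hnohit : w[m] ∉ (w.take (m - 2)).drop (gre w m).2 := by
            rw [hslice]
            intro hmem
            have := hiff.mp hmem
            omega
          have hgre' : gre w (m + 1) = gre w m := by rw [hgre, if_neg hnohit]
          rw [hstep]
          apply ih (m + 1) _ (by omega) (by omega)
          · rw [hgre']; exact h1
          · intro c'
            rw [hgre', hseg']
            by_cases hcc : c' = w[m]
            · subst hcc
              rw [fIdx_append_of_mem (fIdx_mem hf), h2]
            · rw [fIdx_append_ne (fun h => hcc h.symm), h2]
    · have : m = w.length := by omega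
      subst this
      simp [PySem.List.enumerate_nil, h1]

-- ===== B = greedy =====

lemma loopB (w : List Char) : ∀ r, r ≤ w.length →
    (pvLoopB w r).1 = (List.range (r + 1)).map (fun i => (gre w i).1) ∧
    (∀ c, (pvLoopB w r).2.get? c = lIdx c (w.take (r - 3))) := by
  intro r
  induction r with
  | zero =>
    intro _
    constructor
    · rfl
    · intro c
      simp [pvLoopB, PySem.Dict.get?_empty, lIdx]
  | succ r ih =>
    intro hr
    obtain ⟨ihdp, ihav⟩ := ih (by omega)
    have hrlt : r < w.length := by omega
    have hgr : w.getD r ' ' = w[r] := List.getD_eq_getElem w ' ' hrlt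
    -- the updated avail dict holds the last occurrence of each char among positions ≤ r-3
    have hav : ∀ c,
        (if 3 ≤ r then (pvLoopB w r).2.insert (w.getD (r - 3) ' ') (r - 3)
         else (pvLoopB w r).2).get? c = lIdx c (w.take (r + 1 - 3)) := by
      intro c
      by_cases h3 : 3 ≤ r
      · rw [if_pos h3]
        have hlt3 : r - 3 < w.length := by omega
        have hg3 : w.getD (r - 3) ' ' = w[r - 3] := List.getD_eq_getElem w ' ' hlt3
        have htake : w.take (r + 1 - 3) = w.take (r - 3) ++ [w[r - 3]] := by
          have : r + 1 - 3 = (r - 3) + 1 := by omega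
          rw [this, List.take_add_one]
          congr 1
          rw [List.getElem?_eq_getElem hlt3]
          rfl
        rw [htake, lIdx_append, hg3, PySem.Dict.get?_insert]
        by_cases hcc : c = w[r - 3]
        · rw [if_pos hcc, if_pos hcc.symm]
          congr 1
          simp
          omega
        · rw [if_neg hcc, if_neg (fun h => hcc h.symm), ihav c]
      · rw [if_neg h3]
        have : r + 1 - 3 = r - 3 := by omega
        rw [this]
        exact ihav c
    have hs_le : (gre w r).2 ≤ r := gre_start_le w r
    have hgre : gre w (r + 1) =
        if w[r] ∈ (w.take (r - 2)).drop (gre w r).2 then ((gre w r).1 + 1, r + 1)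
        else gre w r := by
      simp only [gre, hgr]
    have hbase : (pvLoopB w r).1.getD r 0 = (gre w r).1 := by
      rw [ihdp]
      exact PySem.List.getD_map_range _ _ _ _ (by omega)
    have hr13 : r + 1 - 3 = r - 2 := by omega
    -- the new dp cell equals the greedy count on the (r+1)-prefix
    have hv : (match (if 3 ≤ r then (pvLoopB w r).2.insert (w.getD (r - 3) ' ') (r - 3)
                     else (pvLoopB w r).2).get? (w.getD r ' ') with
               | none => (pvLoopB w r).1.getD r 0
               | some l => max ((pvLoopB w r).1.getD r 0) ((pvLoopB w r).1.getD l 0 + 1))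
        = (gre w (r + 1)).1 := by
      rw [hav, hgr, hr13]
      cases hl : lIdx w[r] (w.take (r - 2)) with
      | none =>
        have hnm : w[r] ∉ w.take (r - 2) := lIdx_none_not_mem hl
        have hnohit : w[r] ∉ (w.take (r - 2)).drop (gre w r).2 := by
          intro hmem
          exact hnm (List.drop_subset _ _ hmem)
        rw [hgre, if_neg hnohit]
        exact hbase
      | some l =>
        change max ((pvLoopB w r).1.getD r 0) ((pvLoopB w r).1.getD l 0 + 1)
          = (gre w (r + 1)).1
        obtain ⟨hl1, hl2⟩ := lIdx_spec hl
        have htlen : (w.take (r - 2)).length = r - 2 := by simp; omega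
        have hlr : l < r - 2 := by omega
        have hlw : l < w.length := by omega
        have hwl : w[l] = w[r] := by
          rw [List.getD_eq_getElem _ ' ' hl1, List.getElem_take] at hl2
          exact hl2
        have hdpl : (pvLoopB w r).1.getD l 0 = (gre w l).1 := by
          rw [ihdp]
          exact PySem.List.getD_map_range _ _ _ _ (by omega)
        rw [hbase, hdpl]
        by_cases hls : (gre w r).2 ≤ l
        · have hhit : w[r] ∈ (w.take (r - 2)).drop (gre w r).2 := by
            have hidx : l - (gre w r).2 < ((w.take (r - 2)).drop (gre w r).2).length := by
              simp
              omega
            have : ((w.take (r - 2)).drop (gre w r).2)[l - (gre w r).2] = w[r] := by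
              rw [List.getElem_drop]
              have : (gre w r).2 + (l - (gre w r).2) = l := by omega
              simp only [this]
              rw [List.getElem_take]
              exact hwl
            exact this ▸ List.getElem_mem hidx
          rw [hgre, if_pos hhit]
          have hGl : (gre w l).1 = (gre w r).1 := gre_const w r l hls (by omega)
          rw [hGl]
          omega
        · have hnohit : w[r] ∉ (w.take (r - 2)).drop (gre w r).2 := by
            intro hmem
            obtain ⟨i, hi, hig⟩ := List.mem_iff_getElem.mp hmem
            rw [List.getElem_drop] at hig
            have hjlt : (gre w r).2 + i < (w.take (r - 2)).length := by
              simp at hi ⊢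
              omega
            have : (w.take (r - 2)).getD ((gre w r).2 + i) ' ' = w[r] := by
              rw [List.getD_eq_getElem _ ' ' hjlt]
              exact hig
            have := lIdx_max hl _ hjlt this
            omega
          rw [hgre, if_neg hnohit]
          have hs1 : 1 ≤ (gre w r).2 := by omega
          have hcut := gre_cut w r hs1
          have hmono := gre_mono w (show l ≤ (gre w r).2 - 1 by omega)
          omega
    constructor
    · simp only [pvLoopB]
      rw [List.range_succ (n := r + 1), List.map_append]
      simp only [List.map_cons, List.map_nil]
      rw [← ihdp, ← hv]
    · intro c
      simp only [pvLoopB]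
      exact hav c

-- ===== VERDICT (by name: the statement is the Claim_ definition above) =====
theorem maxSubstrings_spec : Claim_equal_maxSubstrings := by
  intro word _
  unfold Spec_maxSubstrings maxSubstrings maxSubstrings_alt
  set w := word.toList with hw
  have hA := foldA w w.length 0 (0, PySem.Dict.empty) (by omega) (by omega)
    (by simp [gre]) (by intro c; simp [gre, fIdx, PySem.Dict.get?_empty])
  have hB := (loopB w w.length (le_refl _)).1
  simp only [List.drop_zero, Nat.cast_zero] at hA
  rw [hA, hB]
  exact (PySem.List.getD_map_range (fun i => (gre w i).1) (w.length + 1) w.length 0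
    (by omega)).symm
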